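-- pv_equiv track=rewrite | github.com/SQCU/dialogue_yoinker | stats_guided_growth.py | _classify_arc_shape
-- ===== SOURCE A (Python) =====
-- from typing import Dict, List, Optional, Set, Tuple, Any
--
-- def _classify_arc_shape(emotions: List[str]) -> str:
--     """Classify an emotion sequence into an arc shape."""
--     if len(emotions) < 2:
--         return "single"
--
--     # Simple arc shape classification
--     unique = list(dict.fromkeys(emotions))  # Preserve order, remove adjacent dupes
--
--     if len(unique) == 1:
--         return f"flat_{unique[0]}"
--
--     if unique[0] == 'neutral' and unique[-1] == 'neutral':
--         if len(unique) > 2: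
--             return f"neutral_peak_{unique[len(unique)//2]}"
--         return "neutral_flat"
--
--     if unique[0] == unique[-1]:
--         return f"return_to_{unique[0]}"
--
--     # Detect escalation/de-escalation
--     intensity_map = {'neutral': 0, 'happy': 1, 'sad': 1, 'surprise': 1, 'fear': 2, 'anger': 2, 'disgust': 2}
--     intensities = [intensity_map.get(e, 0) for e in unique]
--
--     if intensities == sorted(intensities):
--         return f"escalation_{unique[0]}_to_{unique[-1]}"
--     if intensities == sorted(intensities, reverse=True):
--         return f"de_escalation_{unique[0]}_to_{unique[-1]}"
--
--     return f"mixed_{unique[0]}_to_{unique[-1]}"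
-- ===== SOURCE B (Python) =====
-- def _step(state, prev, v):
--     """Direction state machine: 0 = all equal so far, 1 = rose and never fell,
--     -1 = fell and never rose, 2 = both directions seen."""
--     if prev is None or v == prev:
--         return state
--     step = 1 if v > prev else -1
--     if state == 0:
--         return step
--     if state != step:
--         return 2
--     return state
--
--
-- def _classify_arc_shape(emotions):
--     """Classify an emotion sequence into an arc shape."""
--     if len(emotions) < 2:
--         return "single"
--
--     INTENSITY = {'neutral': 0, 'happy': 1, 'sad': 1, 'surprise': 1,
--                  'fear': 2, 'anger': 2, 'disgust': 2}
--
--     # Single fused pass: order-preserving dedup together with a direction state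
--     # machine over the intensities of the deduped sequence; no intensities list
--     # and no sorted copies are ever built.
--     unique = []
--     seen = set()
--     state = 0
--     prev = None
--     for e in emotions:
--         if e in seen:
--             continue
--         seen.add(e)
--         unique.append(e)
--         v = INTENSITY.get(e, 0)
--         state = _step(state, prev, v)
--         prev = v
--
--     first, last = unique[0], unique[-1]
--     n = len(unique)
--     if n == 1:
--         return "flat_" + first
--     if first == 'neutral' and last == 'neutral':
--         if n > 2:
--             return "neutral_peak_" + unique[n // 2]
--         return "neutral_flat"
--     if first == last:
--         return "return_to_" + first
--     if state == 2:
--         return "mixed_" + first + "_to_" + last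
--     if state == -1:
--         return "de_escalation_" + first + "_to_" + last
--     return "escalation_" + first + "_to_" + last
-- ===== Notes on version B (the rewrite author's own statement) =====
-- stated objective: alternative
-- what changed: B fuses dedup and monotonicity detection into one pass driven by a 4-state direction state machine (flat/rising/falling/mixed) over the intensities as they are first seen, so no intensities list and no sorted copies are ever materialised; the final label is read off the machine's state.
import Mathlib
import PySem

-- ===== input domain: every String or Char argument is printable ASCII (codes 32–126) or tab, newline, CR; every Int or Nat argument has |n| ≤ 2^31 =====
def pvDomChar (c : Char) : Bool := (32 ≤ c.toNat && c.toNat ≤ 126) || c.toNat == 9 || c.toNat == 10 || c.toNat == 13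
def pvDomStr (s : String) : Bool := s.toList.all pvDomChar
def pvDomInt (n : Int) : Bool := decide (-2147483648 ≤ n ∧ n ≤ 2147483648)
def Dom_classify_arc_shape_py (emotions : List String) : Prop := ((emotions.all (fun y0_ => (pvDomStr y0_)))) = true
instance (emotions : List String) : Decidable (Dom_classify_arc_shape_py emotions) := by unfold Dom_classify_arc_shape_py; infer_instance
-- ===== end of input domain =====

-- B fuses dedup and monotonicity detection into one pass driven by a 4-state direction
-- state machine over the intensities as first seen, instead of A's staged
-- dedup / intensities list / two sorted copies (objective: alternative).

-- ===== PORT A =====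

-- intensity_map.get(e, 0) on the literal dict (branch order = dict literal order)
def pvIntensity (e : String) : Int :=
  if e = "neutral" then 0
  else if e = "happy" then 1
  else if e = "sad" then 1
  else if e = "surprise" then 1
  else if e = "fear" then 2
  else if e = "anger" then 2
  else if e = "disgust" then 2
  else 0

-- Faithful port of A. The indexings unique[0], unique[-1], unique[len//2] are always in
-- range on the reached paths (unique is nonempty once len(emotions) ≥ 2), so pyGetD's
-- default "" is never used and Python never raises.
def classify_arc_shape_py (emotions : List String) : String :=
  if emotions.length < 2 then "single"
  else
    let unique := PySem.List.dedup emotions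
    if unique.length = 1 then "flat_" ++ PySem.List.pyGetD unique 0 ""
    else if PySem.List.pyGetD unique 0 "" = "neutral" ∧ PySem.List.pyGetD unique (-1) "" = "neutral" then
      if unique.length > 2 then
        "neutral_peak_" ++ PySem.List.pyGetD unique (PySem.Int.floordiv (unique.length : Int) 2) ""
      else "neutral_flat"
    else if PySem.List.pyGetD unique 0 "" = PySem.List.pyGetD unique (-1) "" then
      "return_to_" ++ PySem.List.pyGetD unique 0 ""
    else
      let intensities := unique.map pvIntensity
      if intensities = PySem.List.sorted intensities (fun x => x) then
        "escalation_" ++ PySem.List.pyGetD unique 0 "" ++ "_to_" ++ PySem.List.pyGetD unique (-1) ""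
      else if intensities = PySem.List.sorted intensities (fun x => x) true then
        "de_escalation_" ++ PySem.List.pyGetD unique 0 "" ++ "_to_" ++ PySem.List.pyGetD unique (-1) ""
      else
        "mixed_" ++ PySem.List.pyGetD unique 0 "" ++ "_to_" ++ PySem.List.pyGetD unique (-1) ""

-- ===== PORT B =====

-- Source B's helper _step(state, prev, v)
def pvStepSt (state : Int) (prev : Option Int) (v : Int) : Int :=
  match prev with
  | none => state
  | some p =>
    if v = p then state
    else
      let step : Int := if p < v then 1 else -1
      if state = 0 then step
      else if state ≠ step then 2
      else state

-- the body of Source B's for-loop (accumulator: unique, seen, state, prev)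
def pvBStep (acc : List String × PySem.Set String × Int × Option Int) (e : String) :
    List String × PySem.Set String × Int × Option Int :=
  match acc with
  | (u, s, st, pr) =>
    if PySem.Set.contains s e then (u, s, st, pr)
    else
      let v := pvIntensity e
      (u ++ [e], PySem.Set.add s e, pvStepSt st pr v, some v)

-- Faithful port of B (Source B): one fused pass, then the dispatch on the machine's state.
def classify_arc_shape_py_alt (emotions : List String) : String :=
  if emotions.length < 2 then "single"
  else
    let acc := emotions.foldl pvBStep ([], ([] : PySem.Set String), 0, none)
    let unique := acc.1
    let st := acc.2.2.1
    let first := PySem.List.pyGetD unique 0 ""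
    let last := PySem.List.pyGetD unique (-1) ""
    if unique.length = 1 then "flat_" ++ first
    else if first = "neutral" ∧ last = "neutral" then
      if unique.length > 2 then
        "neutral_peak_" ++ PySem.List.pyGetD unique (PySem.Int.floordiv (unique.length : Int) 2) ""
      else "neutral_flat"
    else if first = last then "return_to_" ++ first
    else if st = 2 then "mixed_" ++ first ++ "_to_" ++ last
    else if st = -1 then "de_escalation_" ++ first ++ "_to_" ++ last
    else "escalation_" ++ first ++ "_to_" ++ last

-- ===== PRECONDITION & SPEC =====
def Spec_classify_arc_shape_py (emotions : List String) (out : String) : Prop := out = classify_arc_shape_py_alt emotions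
instance (emotions : List String) (out : String) : Decidable (Spec_classify_arc_shape_py emotions out) := by unfold Spec_classify_arc_shape_py; infer_instance

-- ===== CLAIM (what is proved, stated in full; the proofs are below) =====
def Claim_equal_classify_arc_shape_py : Prop := ∀ (emotions : List String), Dom_classify_arc_shape_py emotions → Spec_classify_arc_shape_py emotions (classify_arc_shape_py emotions)

-- ===== LEMMAS AND PROOFS =====

-- adjacent-pair characterisations of intensities == sorted(intensities[, reverse])
def pvChainLe : List Int → Bool
  | a :: b :: t => decide (a ≤ b) && pvChainLe (b :: t)
  | _ => true

def pvChainGe : List Int → Bool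
  | a :: b :: t => decide (b ≤ a) && pvChainGe (b :: t)
  | _ => true

-- proof-side view of the state machine: per-pair direction and its join
def pvDir (p v : Int) : Int := if v = p then 0 else if p < v then 1 else -1

def pvJoin (x y : Int) : Int := if x = 0 then y else if y = 0 then x else if x = y then x else 2

def pvStep (sp : Int × Option Int) (v : Int) : Int × Option Int := (pvStepSt sp.1 sp.2 v, some v)

def pvStClass (l : List Int) : Int :=
  if pvChainLe l then (if pvChainGe l then 0 else 1) else if pvChainGe l then -1 else 2

def pvValid (x : Int) : Prop := x = 0 ∨ x = 1 ∨ x = -1 ∨ x = 2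

-- the strings appended to `unique` by the loop, starting from seen-set u
def pvNewElems : List String → List String → List String
  | [], _ => []
  | e :: t, u => if u.contains e then pvNewElems t u else e :: pvNewElems t (u ++ [e])

theorem pvFoldAdd_eq_newElems (xs : List String) (u : List String) :
    xs.foldl PySem.Set.add u = u ++ pvNewElems xs u := by
  induction xs generalizing u with
  | nil => simp [pvNewElems]
  | cons e t ih =>
    simp only [List.foldl_cons, pvNewElems, PySem.Set.add, PySem.Set.contains]
    by_cases h : e ∈ u
    · simpa [h, List.contains_eq_mem] using ih u
    · simpa [h, List.contains_eq_mem] using ih (u ++ [e])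

theorem pvFold_decomp (xs : List String) (u : List String) (st : Int) (pr : Option Int) :
    xs.foldl pvBStep (u, (u : PySem.Set String), st, pr) =
      (u ++ pvNewElems xs u, u ++ pvNewElems xs u,
       ((pvNewElems xs u).map pvIntensity).foldl pvStep (st, pr)) := by
  induction xs generalizing u st pr with
  | nil => simp [pvNewElems]
  | cons e t ih =>
    simp only [List.foldl_cons, pvBStep, pvNewElems, PySem.Set.contains, PySem.Set.add]
    by_cases h : u.contains e
    · simp only [h, if_true]
      exact ih u st pr
    · simp only [h, Bool.false_eq_true, if_false, List.map_cons, List.foldl_cons]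
      have := ih (u ++ [e]) (pvStepSt st pr (pvIntensity e)) (some (pvIntensity e))
      simp only [List.append_assoc, List.singleton_append] at this ⊢
      exact this

theorem pvDir_valid (p v : Int) : pvValid (pvDir p v) := by
  unfold pvDir pvValid; split_ifs <;> simp

theorem pvStClass_valid (l : List Int) : pvValid (pvStClass l) := by
  unfold pvStClass pvValid; split_ifs <;> simp

theorem pvJoin_zero (x : Int) : pvJoin x 0 = x := by
  unfold pvJoin; split_ifs <;> omega

theorem pvJoin_assoc (x d c : Int) (hd : pvValid d) (hc : pvValid c) :
    pvJoin (pvJoin x d) c = pvJoin x (pvJoin d c) := by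
  rcases hd with rfl | rfl | rfl | rfl <;> rcases hc with rfl | rfl | rfl | rfl <;>
    unfold pvJoin <;> split_ifs <;> omega

-- pvStepSt with a present prev is the join with the pair direction
theorem pvChainLe_cons2 (a b : Int) (t : List Int) :
    pvChainLe (a :: b :: t) = (decide (a ≤ b) && pvChainLe (b :: t)) := rfl

theorem pvChainGe_cons2 (a b : Int) (t : List Int) :
    pvChainGe (a :: b :: t) = (decide (b ≤ a) && pvChainGe (b :: t)) := rfl

theorem pvStepSt_eq_join (st p v : Int) : pvStepSt st (some p) v = pvJoin st (pvDir p v) := by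
  by_cases h1 : v = p <;> by_cases h2 : p < v <;>
    simp only [pvStepSt, pvDir, pvJoin, h1, h2, if_true, if_false] <;>
    split_ifs <;> first | omega | exact False.elim ‹False›

theorem pvStClass_cons (a v : Int) (t : List Int) :
    pvStClass (a :: v :: t) = pvJoin (pvDir a v) (pvStClass (v :: t)) := by
  rcases lt_trichotomy a v with hav | rfl | hav
  · have d1 : pvDir a v = 1 := by unfold pvDir; rw [if_neg (by omega), if_pos hav]
    have e1 : decide (a ≤ v) = true := by simp [hav.le]
    have e2 : decide (v ≤ a) = false := by simp; omega
    rw [d1]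
    simp only [pvStClass, pvChainLe_cons2, pvChainGe_cons2, e1, e2, Bool.true_and, Bool.false_and]
    rcases Bool.eq_false_or_eq_true (pvChainLe (v :: t)) with hle | hle <;>
    rcases Bool.eq_false_or_eq_true (pvChainGe (v :: t)) with hge | hge <;>
      simp [hle, hge, pvJoin]
  · have d1 : pvDir a a = 0 := by unfold pvDir; rw [if_pos rfl]
    rw [d1]
    simp only [pvStClass, pvChainLe_cons2, pvChainGe_cons2, le_refl,
      decide_true, Bool.true_and]
    rcases Bool.eq_false_or_eq_true (pvChainLe (a :: t)) with hle | hle <;>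
    rcases Bool.eq_false_or_eq_true (pvChainGe (a :: t)) with hge | hge <;>
      simp [hle, hge, pvJoin]
  · have d1 : pvDir a v = -1 := by unfold pvDir; rw [if_neg (by omega), if_neg (by omega)]
    have e1 : decide (a ≤ v) = false := by simp; omega
    have e2 : decide (v ≤ a) = true := by simp [hav.le]
    rw [d1]
    simp only [pvStClass, pvChainLe_cons2, pvChainGe_cons2, e1, e2, Bool.true_and, Bool.false_and]
    rcases Bool.eq_false_or_eq_true (pvChainLe (v :: t)) with hle | hle <;>
    rcases Bool.eq_false_or_eq_true (pvChainGe (v :: t)) with hge | hge <;>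
      simp [hle, hge, pvJoin]

-- folding the machine over l from (st, some a) joins st with the class of a::l
theorem pvFoldStep_char (l : List Int) (a st : Int) :
    (l.foldl pvStep (st, some a)).1 = pvJoin st (pvStClass (a :: l)) := by
  induction l generalizing a st with
  | nil =>
    simp only [List.foldl_nil]
    have : pvStClass [a] = 0 := by unfold pvStClass pvChainLe pvChainGe; simp
    rw [this, pvJoin_zero]
  | cons v t ih =>
    simp only [List.foldl_cons, pvStep, pvStepSt_eq_join]
    rw [ih, pvStClass_cons,
      pvJoin_assoc st (pvDir a v) (pvStClass (v :: t)) (pvDir_valid a v) (pvStClass_valid _)]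

theorem pvChainLe_iff (xs : List Int) : pvChainLe xs = true ↔ xs.Pairwise (fun a b => a ≤ b) := by
  induction xs with
  | nil => simp [pvChainLe]
  | cons a t ih =>
    cases t with
    | nil => simp [pvChainLe]
    | cons b u =>
      simp only [pvChainLe, Bool.and_eq_true, decide_eq_true_eq, ih, List.pairwise_cons]
      constructor
      · rintro ⟨hab, hb, hu⟩
        refine ⟨?_, hb, hu⟩
        intro y hy
        rcases List.mem_cons.mp hy with rfl | hy
        · exact hab
        · exact le_trans hab (hb y hy)
      · rintro ⟨ha, hb, hu⟩
        exact ⟨ha b (List.mem_cons_self), hb, hu⟩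

theorem pvChainGe_iff (xs : List Int) : pvChainGe xs = true ↔ xs.Pairwise (fun a b => b ≤ a) := by
  induction xs with
  | nil => simp [pvChainGe]
  | cons a t ih =>
    cases t with
    | nil => simp [pvChainGe]
    | cons b u =>
      simp only [pvChainGe, Bool.and_eq_true, decide_eq_true_eq, ih, List.pairwise_cons]
      constructor
      · rintro ⟨hab, hb, hu⟩
        refine ⟨?_, hb, hu⟩
        intro y hy
        rcases List.mem_cons.mp hy with rfl | hy
        · exact hab
        · exact le_trans (hb y hy) hab
      · rintro ⟨ha, hb, hu⟩
        exact ⟨ha b (List.mem_cons_self), hb, hu⟩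

theorem pvSortedEq_iff_chainLe (xs : List Int) :
    (xs = PySem.List.sorted xs (fun x => x)) ↔ pvChainLe xs = true := by
  rw [pvChainLe_iff]
  constructor
  · intro h
    rw [h]
    exact PySem.List.sorted_pairwise xs (fun x => x)
  · intro h
    exact (PySem.List.sorted_eq_self_of_pairwise xs (fun x => x) h).symm

theorem pvSortedRevEq_iff_chainGe (xs : List Int) :
    (xs = PySem.List.sorted xs (fun x => x) true) ↔ pvChainGe xs = true := by
  rw [pvChainGe_iff]
  constructor
  · intro h
    rw [h]
    exact PySem.List.sorted_pairwise_rev xs (fun x => x)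
  · intro h
    exact (PySem.List.sorted_rev_eq_self_of_pairwise xs (fun x => x) h).symm

-- B's final machine state is pvStClass of the intensities of the deduped list
theorem pvState_eq_class (emotions : List String) :
    (emotions.foldl pvBStep ([], ([] : PySem.Set String), 0, none)).2.2.1 =
      pvStClass ((PySem.List.dedup emotions).map pvIntensity) ∧
    (emotions.foldl pvBStep ([], ([] : PySem.Set String), 0, none)).1 =
      PySem.List.dedup emotions := by
  have hdecomp := pvFold_decomp emotions [] 0 none
  have hnew : pvNewElems emotions [] = PySem.List.dedup emotions := by
    have := pvFoldAdd_eq_newElems emotions []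
    rw [PySem.List.dedup_eq_ofList, PySem.Set.ofList_eq_foldl]
    simpa using this.symm
  rw [hdecomp, hnew]
  refine ⟨?_, rfl⟩
  cases h : (PySem.List.dedup emotions).map pvIntensity with
  | nil => simp [pvStClass, pvChainLe, pvChainGe]
  | cons v rest =>
    simp only [List.foldl_cons]
    have h0 : pvStep (0, none) v = (0, some v) := by rfl
    rw [h0, pvFoldStep_char rest v 0]
    unfold pvJoin
    simp

-- ===== VERDICT (by name: the statement is the Claim_ definition above) =====
theorem classify_arc_shape_py_spec : Claim_equal_classify_arc_shape_py := by
  intro emotions _h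
  unfold Spec_classify_arc_shape_py classify_arc_shape_py classify_arc_shape_py_alt
  obtain ⟨hst, hu⟩ := pvState_eq_class emotions
  simp only [hst, hu]
  by_cases h1 : emotions.length < 2
  · simp only [h1, if_true]
  · simp only [h1, if_false]
    set uniq := PySem.List.dedup emotions with huniq
    by_cases h2 : uniq.length = 1
    · simp [h2]
    · simp only [h2, if_false]
      by_cases h3 : PySem.List.pyGetD uniq 0 "" = "neutral" ∧ PySem.List.pyGetD uniq (-1) "" = "neutral"
      · simp [h3]
      · simp only [h3, if_false]
        by_cases h4 : PySem.List.pyGetD uniq 0 "" = PySem.List.pyGetD uniq (-1) ""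
        · simp [h4]
        · simp only [h4, if_false]
          set l := uniq.map pvIntensity with hl
          by_cases hle : pvChainLe l = true <;> by_cases hge : pvChainGe l = true
          · rw [if_pos ((pvSortedEq_iff_chainLe l).mpr hle)]
            unfold pvStClass
            simp [hle, hge]
          · rw [if_pos ((pvSortedEq_iff_chainLe l).mpr hle)]
            unfold pvStClass
            simp [hle, hge]
          · rw [if_neg (fun hc => hle ((pvSortedEq_iff_chainLe l).mp hc)),
              if_pos ((pvSortedRevEq_iff_chainGe l).mpr hge)]
            unfold pvStClass
            simp [hle, hge]
          · rw [if_neg (fun hc => hle ((pvSortedEq_iff_chainLe l).mp hc)),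
              if_neg (fun hc => hge ((pvSortedRevEq_iff_chainGe l).mp hc))]
            unfold pvStClass
            simp [hle, hge]
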